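-- pv_equiv track=rewrite | github.com/jeziellopes/MITx-6.00x-Introduction-to-Computer-Science-and-Programming | Exam1/Problem7.py | generateForm
-- ===== SOURCE A (Python) =====
-- def generateForm(story, listOfAdjs, listOfNouns, listOfVerbs):
--     """
--     story: a string containing sentences
--     listOfAdjs: a list of valid adjectives
--     listOfNouns: a list of valid nouns
--     listOfVerbs: a list of valid verbs
--
--     For each word in story that is in one of the lists,
--     * replace it with the string '[ADJ]' if the word is in listOfAdjs
--     * replace it with the string '[VERB]' if the word is in listOfVerbs
--     * replace it with the string '[NOUN]' if the word is in listOfNouns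
--
--     returns: string, A Mad-Libs form of the story."""
--
--     if story.find(' ') != -1:
--         word = story[:story.find(' ')]
--         start = story.find(' ')+1
--         if word in listOfAdjs:
--             return '[ADJ] ' + generateForm(story[start:], listOfAdjs, listOfNouns, listOfVerbs)
--         elif word in listOfNouns:
--                 return '[NOUN] ' + generateForm(story[start:], listOfAdjs, listOfNouns, listOfVerbs)
--         elif word in listOfVerbs:
--             return '[VERB] ' + generateForm(story[start:], listOfAdjs, listOfNouns, listOfVerbs)
--         else:
--             return word + ' ' + generateForm(story[start:], listOfAdjs, listOfNouns, listOfVerbs)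
--     elif story in listOfAdjs:
--         return '[ADJ]'
--     elif story in listOfNouns:
--         return '[NOUN]'
--     elif story in listOfVerbs:
--         return '[VERB]'
--     else:
--         return story
-- ===== SOURCE B (Python) =====
-- def generateForm(story, listOfAdjs, listOfNouns, listOfVerbs):
--     result = []
--     for word in story.split(' '):
--         if word in listOfAdjs:
--             result.append('[ADJ]')
--         elif word in listOfNouns:
--             result.append('[NOUN]')
--         elif word in listOfVerbs:
--             result.append('[VERB]')
--         else:
--             result.append(word)
--     return ' '.join(result)
-- ===== Notes on version B (the rewrite author's own statement) =====
-- stated objective: simpler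
-- what changed: A's recursion over suffixes with repeated find/slice and four duplicated return branches is replaced by one split(' '), a single loop appending the tag or the word, and a final ' '.join.
import Mathlib
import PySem

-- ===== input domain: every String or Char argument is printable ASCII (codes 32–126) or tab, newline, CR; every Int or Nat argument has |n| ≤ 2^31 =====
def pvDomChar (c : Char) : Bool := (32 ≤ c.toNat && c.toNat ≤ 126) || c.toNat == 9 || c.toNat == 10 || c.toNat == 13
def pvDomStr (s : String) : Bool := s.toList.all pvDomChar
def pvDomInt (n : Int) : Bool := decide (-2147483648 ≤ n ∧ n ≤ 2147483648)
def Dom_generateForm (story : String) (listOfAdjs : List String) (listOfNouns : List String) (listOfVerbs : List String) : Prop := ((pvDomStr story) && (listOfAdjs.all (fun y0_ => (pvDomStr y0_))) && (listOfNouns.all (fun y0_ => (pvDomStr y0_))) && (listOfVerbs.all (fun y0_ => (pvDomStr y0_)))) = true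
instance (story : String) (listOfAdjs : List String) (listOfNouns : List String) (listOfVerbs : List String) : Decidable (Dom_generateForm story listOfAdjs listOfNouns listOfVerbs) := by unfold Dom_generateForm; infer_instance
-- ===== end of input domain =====

-- B replaces A's suffix recursion (repeated find/slice, four duplicated branches) by one split(' '), a single tagging loop and ' '.join — objective: simpler.
-- Both ports work on List Char (PySem string functions are defined there) and are wrapped back to String.

-- ===== PORT A =====
-- literal transliteration of A's recursion: find(' '), slice out the word, recurse on the suffix
def generateFormChars (cs : List Char) (adjs nouns verbs : List (List Char)) : List Char :=
  if h : PySem.Chars.find cs [' '] ≠ -1 then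
    let word := PySem.List.slice cs none (some (PySem.Chars.find cs [' ']))
    let start := PySem.Chars.find cs [' '] + 1
    let rest := PySem.List.slice cs (some start) none
    if word ∈ adjs then "[ADJ] ".toList ++ generateFormChars rest adjs nouns verbs
    else if word ∈ nouns then "[NOUN] ".toList ++ generateFormChars rest adjs nouns verbs
    else if word ∈ verbs then "[VERB] ".toList ++ generateFormChars rest adjs nouns verbs
    else word ++ " ".toList ++ generateFormChars rest adjs nouns verbs
  else if cs ∈ adjs then "[ADJ]".toList
  else if cs ∈ nouns then "[NOUN]".toList
  else if cs ∈ verbs then "[VERB]".toList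
  else cs
termination_by cs.length
decreasing_by
  all_goals {
    have h0 : 0 ≤ PySem.Chars.find cs [' '] := by
      have := PySem.Chars.neg_one_le_find cs [' ']; omega
    have hin : [' '] <:+: cs := (PySem.Chars.find_ne_neg_one_iff cs [' ']).mp h
    have hne : cs ≠ [] := by
      intro hnil; subst hnil
      rcases hin with ⟨a, b, hab⟩
      simpa using congrArg List.length hab
    rw [PySem.List.slice_from _ (by omega)]
    have : 1 ≤ (PySem.Chars.find cs [' '] + 1).toNat := by omega
    have hlen : 1 ≤ cs.length := by cases cs <;> simp_all
    simp only [List.length_drop]; omega }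

def generateForm (story : String) (listOfAdjs : List String) (listOfNouns : List String) (listOfVerbs : List String) : String :=
  String.ofList (generateFormChars story.toList (listOfAdjs.map String.toList) (listOfNouns.map String.toList) (listOfVerbs.map String.toList))

-- ===== PORT B =====
-- tag one token (the body of B's loop)
def tagWord (adjs nouns verbs : List (List Char)) (w : List Char) : List Char :=
  if w ∈ adjs then "[ADJ]".toList
  else if w ∈ nouns then "[NOUN]".toList
  else if w ∈ verbs then "[VERB]".toList
  else w

def generateFormChars_alt (cs : List Char) (adjs nouns verbs : List (List Char)) : List Char :=
  let tokens := PySem.Chars.splitOn cs [' ']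
  let result := tokens.foldl (fun acc w => acc ++ [tagWord adjs nouns verbs w]) []
  PySem.Chars.join [' '] result

def generateForm_alt (story : String) (listOfAdjs : List String) (listOfNouns : List String) (listOfVerbs : List String) : String :=
  String.ofList (generateFormChars_alt story.toList (listOfAdjs.map String.toList) (listOfNouns.map String.toList) (listOfVerbs.map String.toList))

-- ===== PRECONDITION & SPEC =====
def Spec_generateForm (story : String) (listOfAdjs : List String) (listOfNouns : List String) (listOfVerbs : List String) (out : String) : Prop := out = generateForm_alt story listOfAdjs listOfNouns listOfVerbs
instance (story : String) (listOfAdjs : List String) (listOfNouns : List String) (listOfVerbs : List String) (out : String) : Decidable (Spec_generateForm story listOfAdjs listOfNouns listOfVerbs out) := by unfold Spec_generateForm; infer_instance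

-- ===== CLAIM (what is proved, stated in full; the proofs are below) =====
def Claim_equal_generateForm : Prop := ∀ (story : String) (listOfAdjs : List String) (listOfNouns : List String) (listOfVerbs : List String), Dom_generateForm story listOfAdjs listOfNouns listOfVerbs → Spec_generateForm story listOfAdjs listOfNouns listOfVerbs (generateForm story listOfAdjs listOfNouns listOfVerbs)

-- ===== LEMMAS AND PROOFS =====

-- accumulator extraction for splitOn.go: the accumulator is a prefix of the final result
lemma go_acc (l : List Char) : ∀ (fuel : Nat) (cur : List Char) (acc : List (List Char)),
    l.length < fuel →
    PySem.Chars.splitOn.go [' '] fuel l cur acc = acc.reverse ++ PySem.Chars.splitOn.go [' '] fuel l cur [] := by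
  induction l with
  | nil =>
    intro fuel cur acc h
    cases fuel with
    | zero => omega
    | succ f => simp [PySem.Chars.splitOn.go]
  | cons c rest ih =>
    intro fuel cur acc h
    cases fuel with
    | zero => omega
    | succ f =>
      simp only [PySem.Chars.splitOn.go]
      by_cases hc : [' '].isPrefixOf (c :: rest) = true
      · simp only [hc, if_true, List.length_cons, List.length_nil, Nat.zero_add,
          List.drop_succ_cons, List.drop_zero] at *
        rw [ih f [] (cur.reverse :: acc) (by simpa using h), ih f [] [cur.reverse] (by simpa using h)]
        simp
      · simp only [hc, List.length_cons] at *
        rw [ih f (c :: cur) acc (by simpa using h), ih f (c :: cur) [] (by simpa using h)]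
        simp

-- a space-free list is one single token
lemma go_no_space (l : List Char) (hl : ' ' ∉ l) : ∀ (fuel : Nat) (cur : List Char) (acc : List (List Char)),
    l.length < fuel →
    PySem.Chars.splitOn.go [' '] fuel l cur acc = ((cur.reverse ++ l) :: acc).reverse := by
  induction l with
  | nil =>
    intro fuel cur acc h
    cases fuel with
    | zero => omega
    | succ f => simp [PySem.Chars.splitOn.go]
  | cons c rest ih =>
    intro fuel cur acc h
    cases fuel with
    | zero => omega
    | succ f =>
      have hcne : c ≠ ' ' := fun hh => hl (by simp [hh])
      have hc : [' '].isPrefixOf (c :: rest) = false := by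
        simp [List.isPrefixOf, Ne.symm hcne]
      simp only [PySem.Chars.splitOn.go, hc, Bool.false_eq_true, if_false, List.length_cons] at *
      rw [ih (fun hm => hl (List.mem_cons_of_mem _ hm)) f (c :: cur) acc (by omega)]
      simp

-- stepping over one space-free word followed by a space
lemma go_step (w : List Char) (hw : ' ' ∉ w) : ∀ (r : List Char) (fuel : Nat) (cur : List Char) (acc : List (List Char)),
    (w ++ ' ' :: r).length < fuel →
    PySem.Chars.splitOn.go [' '] fuel (w ++ ' ' :: r) cur acc
      = PySem.Chars.splitOn.go [' '] (fuel - (w.length + 1)) r [] ((cur.reverse ++ w) :: acc) := by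
  induction w with
  | nil =>
    intro r fuel cur acc h
    cases fuel with
    | zero => simp at h
    | succ f =>
      have hc : [' '].isPrefixOf (' ' :: r) = true := by simp [List.isPrefixOf]
      simp [PySem.Chars.splitOn.go, hc]
  | cons c w' ih =>
    intro r fuel cur acc h
    cases fuel with
    | zero => simp at h
    | succ f =>
      have hcne : c ≠ ' ' := fun hh => hw (by simp [hh])
      have hc : [' '].isPrefixOf (c :: (w' ++ ' ' :: r)) = false := by
        simp [List.isPrefixOf, Ne.symm hcne]
      simp only [List.cons_append, PySem.Chars.splitOn.go, hc, Bool.false_eq_true, if_false]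
      rw [ih (fun hm => hw (List.mem_cons_of_mem _ hm)) r f (c :: cur) acc (by simp at h ⊢; omega)]
      have : f - (w'.length + 1) = f + 1 - (c :: w').length - 1 := by simp; omega
      simp [this]

lemma splitOn_no_space (l : List Char) (hl : ' ' ∉ l) : PySem.Chars.splitOn l [' '] = [l] := by
  unfold PySem.Chars.splitOn
  rw [go_no_space l hl _ _ _ (by omega)]
  simp

lemma splitOn_cons_space (w r : List Char) (hw : ' ' ∉ w) :
    PySem.Chars.splitOn (w ++ ' ' :: r) [' '] = w :: PySem.Chars.splitOn r [' '] := by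
  unfold PySem.Chars.splitOn
  rw [go_step w hw r _ [] [] (by omega)]
  have hf : (w ++ ' ' :: r).length + 1 - (w.length + 1) = r.length + 1 := by
    simp only [List.length_append, List.length_cons]; omega
  simp only [List.reverse_nil, List.nil_append]
  rw [hf, go_acc r _ [] [w] (by omega)]
  simp

lemma go_ne_nil (l : List Char) : ∀ (fuel : Nat) (cur : List Char),
    l.length < fuel → PySem.Chars.splitOn.go [' '] fuel l cur [] ≠ [] := by
  induction l with
  | nil =>
    intro fuel cur h
    cases fuel with
    | zero => omega
    | succ f => simp [PySem.Chars.splitOn.go]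
  | cons c rest ih =>
    intro fuel cur h
    cases fuel with
    | zero => omega
    | succ f =>
      simp only [PySem.Chars.splitOn.go]
      by_cases hc : [' '].isPrefixOf (c :: rest) = true
      · simp only [hc, if_true]
        rw [go_acc _ _ _ _ (by simp at h ⊢; omega)]
        simp
      · simp only [hc]
        exact ih f (c :: cur) (by simp at h ⊢; omega)

lemma splitOn_ne_nil (l : List Char) : PySem.Chars.splitOn l [' '] ≠ [] := by
  unfold PySem.Chars.splitOn
  exact go_ne_nil l _ [] (by omega)

-- find ' ' decomposes the list into a space-free prefix, the space, and the rest
lemma find_decomp (cs : List Char) (h : PySem.Chars.find cs [' '] ≠ -1) :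
    (PySem.Chars.find cs [' ']).toNat < cs.length ∧
    cs = cs.take (PySem.Chars.find cs [' ']).toNat ++ ' ' :: cs.drop ((PySem.Chars.find cs [' ']).toNat + 1) ∧
    ' ' ∉ cs.take (PySem.Chars.find cs [' ']).toNat := by
  have h0 : 0 ≤ PySem.Chars.find cs [' '] := by
    have := PySem.Chars.neg_one_le_find cs [' ']; omega
  obtain ⟨hpre, hmin⟩ := PySem.Chars.find_spec h0
  set f := (PySem.Chars.find cs [' ']).toNat with hfdef
  obtain ⟨t, ht⟩ := hpre
  have hlt : f < cs.length := by
    by_contra hge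
    have : cs.drop f = [] := List.drop_eq_nil_of_le (by omega)
    rw [this] at ht; simp at ht
  have hdropf : cs.drop f = ' ' :: cs.drop (f + 1) := by
    have h1 : cs.drop f = cs[f] :: cs.drop (f + 1) := List.drop_eq_getElem_cons hlt
    have h2 : cs[f] = ' ' := by
      have h3 := congrArg (fun l => l.head?) ht
      rw [h1] at h3
      simp [List.getElem?_eq_getElem hlt] at h3
      exact h3.symm
    rw [h1, h2]
  refine ⟨hlt, ?_, ?_⟩
  · conv_lhs => rw [← List.take_append_drop f cs]
    rw [hdropf]
  · intro hmem
    obtain ⟨i, hi, hget⟩ := List.getElem_of_mem hmem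
    have hif : i < f := by
      have := List.length_take_le f cs; omega
    have : [' '] <+: cs.drop i := by
      have hgi : cs[i]'(by omega) = ' ' := by
        simpa [List.getElem_take] using hget
      rw [List.drop_eq_getElem_cons (by omega : i < cs.length), hgi]
      exact ⟨_, rfl⟩
    exact hmin i hif this

-- no-space case of the main equivalence
lemma chars_base (cs : List Char) (h : ¬ PySem.Chars.find cs [' '] ≠ -1) (adjs nouns verbs : List (List Char)) :
    generateFormChars cs adjs nouns verbs
      = PySem.Chars.join [' '] ((PySem.Chars.splitOn cs [' ']).map (tagWord adjs nouns verbs)) := by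
  simp only [ne_eq, not_not] at h
  have hnotin : ' ' ∉ cs := by
    intro hm
    obtain ⟨s, t, rfl⟩ := List.append_of_mem hm
    exact (PySem.Chars.find_eq_neg_one_iff _ _).mp h ⟨s, t, by simp⟩
  rw [splitOn_no_space cs hnotin, generateFormChars]
  simp only [h, ne_eq, not_true_eq_false, dite_false, List.map_cons, List.map_nil,
    PySem.Chars.join_singleton, tagWord]

-- main equivalence on char lists: A's recursion computes B's split/tag/join
lemma chars_main (n : Nat) : ∀ (cs : List Char), cs.length ≤ n → ∀ (adjs nouns verbs : List (List Char)),
    generateFormChars cs adjs nouns verbs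
      = PySem.Chars.join [' '] ((PySem.Chars.splitOn cs [' ']).map (tagWord adjs nouns verbs)) := by
  induction n with
  | zero =>
    intro cs hlen adjs nouns verbs
    have : cs = [] := List.eq_nil_of_length_eq_zero (by omega)
    subst this
    exact chars_base [] (by decide) adjs nouns verbs
  | succ n' ih =>
    intro cs hlen adjs nouns verbs
    by_cases h : PySem.Chars.find cs [' '] ≠ -1
    · obtain ⟨hlt, hdec, hnsp⟩ := find_decomp cs h
      have h0 : 0 ≤ PySem.Chars.find cs [' '] := by
        have := PySem.Chars.neg_one_le_find cs [' ']; omega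
      set f := (PySem.Chars.find cs [' ']).toNat with hf
      set w := cs.take f with hwdef
      set r := cs.drop (f + 1) with hrdef
      have hsplit : PySem.Chars.splitOn cs [' '] = w :: PySem.Chars.splitOn r [' '] := by
        conv_lhs => rw [hdec]
        exact splitOn_cons_space w r hnsp
      obtain ⟨p, ps, hps⟩ := List.exists_cons_of_ne_nil (splitOn_ne_nil r)
      have hjoin : PySem.Chars.join [' '] ((PySem.Chars.splitOn cs [' ']).map (tagWord adjs nouns verbs))
          = tagWord adjs nouns verbs w ++ " ".toList
            ++ PySem.Chars.join [' '] ((PySem.Chars.splitOn r [' ']).map (tagWord adjs nouns verbs)) := by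
        rw [hsplit, hps]
        simp only [List.map_cons, PySem.Chars.join_cons_cons]
        simp
      have hword : PySem.List.slice cs none (some (PySem.Chars.find cs [' '])) = w := by
        rw [PySem.List.slice_to _ h0]
      have hrest : PySem.List.slice cs (some (PySem.Chars.find cs [' '] + 1)) none = r := by
        rw [PySem.List.slice_from _ (by omega)]
        congr 1; omega
      have hih : generateFormChars r adjs nouns verbs
          = PySem.Chars.join [' '] ((PySem.Chars.splitOn r [' ']).map (tagWord adjs nouns verbs)) := by
        apply ih
        rw [hrdef]
        simp only [List.length_drop]
        omega
      rw [hjoin, generateFormChars]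
      simp only [hword, hrest, hih, tagWord]
      split_ifs <;> congr 1
    · exact chars_base cs h adjs nouns verbs

-- ===== VERDICT (by name: the statement is the Claim_ definition above) =====
theorem generateForm_spec : Claim_equal_generateForm := by
  intro story adjs nouns verbs _
  unfold Spec_generateForm generateForm generateForm_alt generateFormChars_alt
  have hfold : ∀ (ts : List (List Char)) (a n v : List (List Char)),
      ts.foldl (fun acc w => acc ++ [tagWord a n v w]) [] = ts.map (tagWord a n v) :=
    fun ts a n v => by simpa using PySem.List.foldl_append_singleton_eq_map (tagWord a n v) ts []
  simp only [hfold]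
  exact congrArg String.ofList (chars_main story.toList.length story.toList le_rfl _ _ _)
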